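-- pv_equiv track=rewrite | github.com/zuozuo0320/TestPilot | executor/raw_locator_guard.py | _split_top_level_args
-- ===== SOURCE A (Python) =====
-- def _consume_string(text: str, index: int) -> int:
--     """跳过字符串字面量，避免把字符串内的括号误判为源码结构。"""
--     quote = text[index]
--     index += 1
--
--     while index < len(text):
--         char = text[index]
--         if char == "\\":
--             index += 2
--             continue
--         if char == quote:
--             return index + 1
--         index += 1
--
--     return index
--
-- def _split_top_level_args(args_text: str) -> list[str]:
--     """按顶层逗号拆分参数，避免对象字面量内部逗号被误切分。"""
--     parts: list[str] = []
--     current: list[str] = []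
--     paren_depth = 0
--     bracket_depth = 0
--     brace_depth = 0
--     index = 0
--
--     while index < len(args_text):
--         char = args_text[index]
--
--         if char in {"'", '"', '`'}:
--             end = _consume_string(args_text, index)
--             current.append(args_text[index:end])
--             index = end
--             continue
--
--         if char == "(":
--             paren_depth += 1
--         elif char == ")":
--             paren_depth = max(paren_depth - 1, 0)
--         elif char == "[":
--             bracket_depth += 1
--         elif char == "]":
--             bracket_depth = max(bracket_depth - 1, 0)
--         elif char == "{":
--             brace_depth += 1
--         elif char == "}":
--             brace_depth = max(brace_depth - 1, 0)
--         elif char == "," and paren_depth == 0 and bracket_depth == 0 and brace_depth == 0: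
--             parts.append("".join(current).strip())
--             current = []
--             index += 1
--             continue
--
--         current.append(char)
--         index += 1
--
--     tail = "".join(current).strip()
--     if tail:
--         parts.append(tail)
--     return parts
-- ===== SOURCE B (Python) =====
-- def _split_top_level_args(args_text: str) -> list[str]:
--     """Split on top-level commas: collect comma positions in one scan, then slice."""
--     n = len(args_text)
--     splits = []
--     paren = bracket = brace = 0
--     i = 0
--     while i < n:
--         ch = args_text[i]
--         if ch in "'\"`":
--             # skip the string literal (same escape/quote rule as the original)
--             j = i + 1
--             while j < n:
--                 c = args_text[j]
--                 if c == "\\":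
--                     j += 2
--                 elif c == ch:
--                     j += 1
--                     break
--                 else:
--                     j += 1
--             i = j
--             continue
--         if ch == "(":
--             paren += 1
--         elif ch == ")":
--             paren = max(paren - 1, 0)
--         elif ch == "[":
--             bracket += 1
--         elif ch == "]":
--             bracket = max(bracket - 1, 0)
--         elif ch == "{":
--             brace += 1
--         elif ch == "}":
--             brace = max(brace - 1, 0)
--         elif ch == "," and paren == bracket == brace == 0:
--             splits.append(i)
--         i += 1
--     parts = []
--     prev = 0
--     for s in splits:
--         parts.append(args_text[prev:s].strip())
--         prev = s + 1
--     tail = args_text[prev:].strip()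
--     if tail:
--         parts.append(tail)
--     return parts
-- ===== Notes on version B (the rewrite author's own statement) =====
-- stated objective: alternative
-- what changed: B replaces A's character-accumulator (building each segment char by char in a list and joining) with a two-phase split: one scan records the indices of top-level commas, then a second pass slices the string between consecutive boundaries and strips each slice.
import Mathlib
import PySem

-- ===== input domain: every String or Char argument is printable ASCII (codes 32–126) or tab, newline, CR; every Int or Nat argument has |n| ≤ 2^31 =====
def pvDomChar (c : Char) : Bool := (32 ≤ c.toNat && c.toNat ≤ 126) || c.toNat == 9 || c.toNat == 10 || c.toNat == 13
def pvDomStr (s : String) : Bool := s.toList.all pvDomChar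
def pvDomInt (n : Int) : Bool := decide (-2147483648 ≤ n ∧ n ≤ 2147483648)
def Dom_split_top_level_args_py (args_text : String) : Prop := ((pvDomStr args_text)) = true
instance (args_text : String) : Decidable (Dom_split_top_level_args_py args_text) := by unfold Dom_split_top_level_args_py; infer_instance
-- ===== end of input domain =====

-- B splits by collecting top-level-comma indices in one scan and slicing between them,
-- instead of A's per-character segment accumulator; same O(n), no speed claim.

def pvIsQuote (c : Char) : Bool := c == '\'' || c == '"' || c == '`'

-- ===== PORT A =====
-- _consume_string, acting on the chars AFTER the opening quote: returns (consumed chars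
-- up to and including the closing quote, remaining chars).  A backslash skips two chars
-- (Python's index += 2; at end of string the slice clamps, so only the backslash remains).
def consumeA (q : Char) : List Char → List Char × List Char
  | [] => ([], [])
  | c :: rest =>
    if c == '\\' then
      match rest with
      | [] => ([c], [])
      | d :: rest' =>
        let (a, b) := consumeA q rest'
        (c :: d :: a, b)
    else if c == q then ([c], rest)
    else
      let (a, b) := consumeA q rest
      (c :: a, b)

theorem consumeA_snd_le (q : Char) (l : List Char) : (consumeA q l).2.length ≤ l.length := by
  fun_induction consumeA q l <;> simp_all <;> omega

-- the main while-loop of _split_top_level_args (depths are Nat: max(d-1,0) is Nat subtraction)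
def loopA : List Char → List Char → Nat → Nat → Nat → List String → List String
  | [], cur, _, _, _, parts =>
    let tail := PySem.Str.strip (String.ofList cur)
    if tail == "" then parts else parts ++ [tail]
  | c :: rest, cur, p, b, r, parts =>
    if pvIsQuote c then
      loopA (consumeA c rest).2 (cur ++ c :: (consumeA c rest).1) p b r parts
    else if c == '(' then loopA rest (cur ++ [c]) (p + 1) b r parts
    else if c == ')' then loopA rest (cur ++ [c]) (p - 1) b r parts
    else if c == '[' then loopA rest (cur ++ [c]) p (b + 1) r parts
    else if c == ']' then loopA rest (cur ++ [c]) p (b - 1) r parts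
    else if c == '{' then loopA rest (cur ++ [c]) p b (r + 1) parts
    else if c == '}' then loopA rest (cur ++ [c]) p b (r - 1) parts
    else if c == ',' && p == 0 && b == 0 && r == 0 then
      loopA rest [] p b r (parts ++ [PySem.Str.strip (String.ofList cur)])
    else loopA rest (cur ++ [c]) p b r parts
  termination_by cs => cs.length
  decreasing_by
    · simp; have := consumeA_snd_le c rest; omega
    all_goals simp

def split_top_level_args_py (args_text : String) : List String :=
  loopA args_text.toList [] 0 0 0 []

-- ===== PORT B =====
-- B's inlined string-skip: number of chars consumed after the opening quote.
def skipLenB (q : Char) : List Char → Nat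
  | [] => 0
  | c :: rest =>
    if c == '\\' then
      match rest with
      | [] => 1
      | _ :: rest' => 2 + skipLenB q rest'
    else if c == q then 1
    else 1 + skipLenB q rest

-- pass 1: absolute positions of top-level commas (pos = index of the head char of cs)
def splitsB : List Char → Nat → Nat → Nat → Nat → List Nat
  | [], _, _, _, _ => []
  | c :: rest, pos, p, b, r =>
    if pvIsQuote c then
      let k := skipLenB c rest
      splitsB (rest.drop k) (pos + 1 + k) p b r
    else if c == '(' then splitsB rest (pos + 1) (p + 1) b r
    else if c == ')' then splitsB rest (pos + 1) (p - 1) b r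
    else if c == '[' then splitsB rest (pos + 1) p (b + 1) r
    else if c == ']' then splitsB rest (pos + 1) p (b - 1) r
    else if c == '{' then splitsB rest (pos + 1) p b (r + 1)
    else if c == '}' then splitsB rest (pos + 1) p b (r - 1)
    else if c == ',' && p == 0 && b == 0 && r == 0 then
      pos :: splitsB rest (pos + 1) p b r
    else splitsB rest (pos + 1) p b r
  termination_by cs => cs.length
  decreasing_by
    all_goals simp

-- pass 2: slice between consecutive boundaries (full[prev:s] = (full.drop prev).take (s-prev)),
-- strip each interior slice, keep the stripped tail only if non-empty
def segsB (full : List Char) : Nat → List Nat → List String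
  | prev, [] =>
    let tail := PySem.Str.strip (String.ofList (full.drop prev))
    if tail == "" then [] else [tail]
  | prev, s :: ss =>
    PySem.Str.strip (String.ofList ((full.drop prev).take (s - prev))) :: segsB full (s + 1) ss

def split_top_level_args_py_alt (args_text : String) : List String :=
  segsB args_text.toList 0 (splitsB args_text.toList 0 0 0 0)

-- ===== PRECONDITION & SPEC =====
def Spec_split_top_level_args_py (args_text : String) (out : List String) : Prop := out = split_top_level_args_py_alt args_text
instance (args_text : String) (out : List String) : Decidable (Spec_split_top_level_args_py args_text out) := by unfold Spec_split_top_level_args_py; infer_instance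

-- ===== CLAIM (what is proved, stated in full; the proofs are below) =====
def Claim_equal_split_top_level_args_py : Prop := ∀ (args_text : String), Dom_split_top_level_args_py args_text → Spec_split_top_level_args_py args_text (split_top_level_args_py args_text)

-- ===== LEMMAS AND PROOFS =====

-- segments of cs as raw char lists (head = current segment); hp prepends to the head segment
def hp (x : List Char) : List (List Char) → List (List Char)
  | [] => [x]
  | g :: gs => (x ++ g) :: gs

def rawSegs : List Char → Nat → Nat → Nat → List (List Char)
  | [], _, _, _ => [[]]
  | c :: rest, p, b, r =>
    if pvIsQuote c then hp (c :: (consumeA c rest).1) (rawSegs (consumeA c rest).2 p b r)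
    else if c == '(' then hp [c] (rawSegs rest (p + 1) b r)
    else if c == ')' then hp [c] (rawSegs rest (p - 1) b r)
    else if c == '[' then hp [c] (rawSegs rest p (b + 1) r)
    else if c == ']' then hp [c] (rawSegs rest p (b - 1) r)
    else if c == '{' then hp [c] (rawSegs rest p b (r + 1))
    else if c == '}' then hp [c] (rawSegs rest p b (r - 1))
    else if c == ',' && p == 0 && b == 0 && r == 0 then [] :: rawSegs rest p b r
    else hp [c] (rawSegs rest p b r)
  termination_by cs => cs.length
  decreasing_by
    · have := consumeA_snd_le c rest; simp; omega
    all_goals simp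

def finalize : List (List Char) → List String
  | [] => []
  | [g] =>
    let t := PySem.Str.strip (String.ofList g)
    if t == "" then [] else [t]
  | g :: gs => PySem.Str.strip (String.ofList g) :: finalize gs

theorem hp_ne_nil (x : List Char) (l : List (List Char)) : hp x l ≠ [] := by
  cases l <;> simp [hp]

theorem rawSegs_ne_nil (cs : List Char) (p b r : Nat) : rawSegs cs p b r ≠ [] := by
  fun_induction rawSegs cs p b r <;> simp_all [hp_ne_nil]

theorem hp_hp (x y : List Char) (l : List (List Char)) : hp x (hp y l) = hp (x ++ y) l := by
  cases l <;> simp [hp]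

theorem hp_nil (l : List (List Char)) (h : l ≠ []) : hp [] l = l := by
  cases l <;> simp_all [hp]

theorem finalize_cons (g : List Char) (gs : List (List Char)) (h : gs ≠ []) :
    finalize (g :: gs) = PySem.Str.strip (String.ofList g) :: finalize gs := by
  cases gs <;> simp_all [finalize]

-- A's loop produces parts ++ finalize of the raw segments (head segment prefixed by cur)
theorem hp_nil_raw (cs : List Char) (p b r : Nat) :
    hp [] (rawSegs cs p b r) = rawSegs cs p b r :=
  hp_nil _ (rawSegs_ne_nil cs p b r)

theorem finalize_cons_raw (g : List Char) (cs : List Char) (p b r : Nat) :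
    finalize (g :: rawSegs cs p b r) =
      PySem.Str.strip (String.ofList g) :: finalize (rawSegs cs p b r) :=
  finalize_cons _ _ (rawSegs_ne_nil cs p b r)

theorem hp_cons (x g : List Char) (gs : List (List Char)) :
    hp x (g :: gs) = (x ++ g) :: gs := rfl

theorem loopA_eq (cs cur : List Char) (p b r : Nat) (parts : List String) :
    loopA cs cur p b r parts = parts ++ finalize (hp cur (rawSegs cs p b r)) := by
  fun_induction loopA cs cur p b r parts
  case case1 =>
    rename_i h
    simp only [rawSegs, hp, finalize, List.append_nil]
    rw [if_pos h]
    simp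
  case case2 =>
    rename_i h
    simp only [rawSegs, hp, finalize, List.append_nil]
    rw [if_neg h]
  case case10 =>
    rename_i ih
    rw [ih, rawSegs]
    simp_all [hp_cons, hp_nil_raw, finalize_cons_raw]
  case case11 =>
    rename_i hc ih
    rw [ih, rawSegs]
    rw [if_neg hc]
    simp_all [hp_hp]
  all_goals (rename_i ih; rw [ih, rawSegs]; simp_all [hp_hp])

theorem skipLenB_eq (q : Char) (l : List Char) : skipLenB q l = (consumeA q l).1.length := by
  fun_induction skipLenB q l
  all_goals (rw [consumeA.eq_def]; simp_all)
  all_goals omega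

theorem consumeA_append (q : Char) (l : List Char) :
    (consumeA q l).1 ++ (consumeA q l).2 = l := by
  fun_induction consumeA q l <;> simp_all

-- B's two passes compute the same finalize of the raw segments: at each scan position,
-- full.drop pos is the unscanned suffix and cur = full[prev:pos] the pending segment.
theorem segsB_eq (cs : List Char) (pos p b r : Nat) (full : List Char) :
    ∀ (cur : List Char) (prev : Nat), full.drop pos = cs → full.drop prev = cur ++ cs →
      prev + cur.length = pos →
      segsB full prev (splitsB cs pos p b r) = finalize (hp cur (rawSegs cs p b r)) := by
  fun_induction splitsB cs pos p b r
  case case1 =>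
    intro cur prev h1 h2 h3
    rw [List.append_nil] at h2
    simp [segsB, rawSegs, hp, finalize, h2]
  case case2 =>
    rename_i c rest pos p b r hq k ih
    intro cur prev h1 h2 h3
    have hk : k = (consumeA c rest).1.length := skipLenB_eq c rest
    have hca := consumeA_append c rest
    have hdrop : rest.drop k = (consumeA c rest).2 := by
      have h5 := List.drop_left (l₁ := (consumeA c rest).1) (l₂ := (consumeA c rest).2)
      rw [hca] at h5
      rw [hk]
      exact h5
    have h1' : full.drop (pos + 1) = rest := by
      simpa [List.drop_drop, Nat.add_comm] using congrArg (List.drop 1) h1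
    rw [rawSegs, if_pos hq, hp_hp]
    rw [hdrop] at ih ⊢
    refine ih (cur ++ c :: (consumeA c rest).1) prev ?_ ?_ ?_
    · have h4 := congrArg (List.drop k) h1'
      rw [List.drop_drop] at h4
      rw [hdrop] at h4
      simpa [Nat.add_comm, Nat.add_assoc, Nat.add_left_comm] using h4
    · rw [h2]
      conv_lhs => rw [← hca]
      simp
    · simp only [List.length_append, List.length_cons, hk]
      omega
  case case9 =>
    rename_i c rest pos p b r hq h1' h2' h3' h4' h5' h6' hcomma ih
    intro cur prev h1 h2 h3
    have hd1 : full.drop (pos + 1) = rest := by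
      simpa [List.drop_drop, Nat.add_comm] using congrArg (List.drop 1) h1
    have htail := ih [] (pos + 1) hd1 (by simpa using hd1) (by simp)
    rw [hp_nil_raw] at htail
    have hcur : (full.drop prev).take (pos - prev) = cur := by
      rw [h2, show pos - prev = cur.length by omega]
      exact List.take_left
    rw [rawSegs, if_neg hq, if_neg h1', if_neg h2', if_neg h3', if_neg h4', if_neg h5',
      if_neg h6', if_pos hcomma]
    rw [segsB, htail, hcur, hp_cons, List.append_nil, finalize_cons_raw]
  case case10 =>
    rename_i c rest pos p b r hq h1' h2' h3' h4' h5' h6' hcomma ih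
    intro cur prev h1 h2 h3
    rw [rawSegs, if_neg hq, if_neg h1', if_neg h2', if_neg h3', if_neg h4', if_neg h5',
      if_neg h6', if_neg hcomma]
    rw [hp_hp]
    refine ih (cur ++ [c]) prev ?_ ?_ ?_
    · simpa [List.drop_drop, Nat.add_comm] using congrArg (List.drop 1) h1
    · rw [h2]
      simp
    · simp
      omega
  all_goals
    (rename_i ih
     intro cur prev h1 h2 h3
     rw [rawSegs]
     simp_all [hp_hp]
     refine ih _ prev ?_ ?_ ?_
     · simpa [List.drop_drop, Nat.add_comm] using congrArg (List.drop 1) h1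
     · rw [h2]; simp
     · simp; omega)

-- ===== VERDICT (by name: the statement is the Claim_ definition above) =====
theorem split_top_level_args_py_spec : Claim_equal_split_top_level_args_py := by
  intro s _
  unfold Spec_split_top_level_args_py split_top_level_args_py split_top_level_args_py_alt
  rw [loopA_eq, segsB_eq s.toList 0 0 0 0 s.toList [] 0 (by simp) (by simp) (by simp)]
  simp
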